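-- pv_equiv track=rewrite | github.com/danoneata/veridiq | veridiq/feature_extractors_dirty/get_test_single_files.py | replace_ethnicity
-- ===== SOURCE A (Python) =====
-- def replace_ethnicity(path: str) -> str:
--     replacements = {
--         "Caucasian_American": "Caucasian (American)",
--         "Asian_East": "Asian (East)",
--         "Asian_South": "Asian (South)",
--         "Caucasian_European": "Caucasian (European)"
--     }
--
--     for old, new in replacements.items():
--         if old in path:
--             path = path.replace(old, new)
--     return path
-- ===== SOURCE B (Python) =====
-- _REPL = (
--     ("Caucasian_American", "Caucasian (American)"),
--     ("Asian_East", "Asian (East)"),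
--     ("Asian_South", "Asian (South)"),
--     ("Caucasian_European", "Caucasian (European)"),
-- )
--
--
-- def replace_ethnicity(path: str) -> str:
--     # One left-to-right pass: at each position emit the replacement for the
--     # first key matching there (keys never overlap and no replacement ever
--     # re-creates a key), otherwise copy the character.
--     out = []
--     i = 0
--     n = len(path)
--     while i < n:
--         for old, new in _REPL:
--             if path.startswith(old, i):
--                 out.append(new)
--                 i += len(old)
--                 break
--         else:
--             out.append(path[i])
--             i += 1
--     return "".join(out)
-- ===== Notes on version B (the rewrite author's own statement) =====
-- stated objective: alternative
-- what changed: Four sequential whole-string str.replace passes (each guarded by an 'in' scan) are fused into one single left-to-right scan that matches any of the four keys at each position and emits its replacement directly.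
import Mathlib
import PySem

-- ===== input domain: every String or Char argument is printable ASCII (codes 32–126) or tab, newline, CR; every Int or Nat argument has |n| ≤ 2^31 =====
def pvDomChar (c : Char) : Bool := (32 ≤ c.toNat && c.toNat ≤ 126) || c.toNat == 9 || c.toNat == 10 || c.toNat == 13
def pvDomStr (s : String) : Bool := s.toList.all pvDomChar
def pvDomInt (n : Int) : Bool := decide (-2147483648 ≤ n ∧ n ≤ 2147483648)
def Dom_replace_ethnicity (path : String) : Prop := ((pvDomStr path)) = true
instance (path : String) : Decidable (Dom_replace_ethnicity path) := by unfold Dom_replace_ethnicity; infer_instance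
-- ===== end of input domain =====

-- B replaces A's four sequential whole-string .replace passes by one left-to-right
-- scan that matches any of the four keys at each position (objective: alternative).

-- ===== PORT A =====
def replace_ethnicity (path : String) : String :=
  let replacements : List (String × String) :=
    [("Caucasian_American", "Caucasian (American)"),
     ("Asian_East", "Asian (East)"),
     ("Asian_South", "Asian (South)"),
     ("Caucasian_European", "Caucasian (European)")]
  replacements.foldl
    (fun p kv => if PySem.Str.isIn kv.1 p then PySem.Str.replace p kv.1 kv.2 else p) path

-- ===== PORT B =====
-- the four (old, new) pairs of Source B's _REPL, as char lists
def pvK1 : List Char := "Caucasian_American".toList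
def pvV1 : List Char := "Caucasian (American)".toList
def pvK2 : List Char := "Asian_East".toList
def pvV2 : List Char := "Asian (East)".toList
def pvK3 : List Char := "Asian_South".toList
def pvV3 : List Char := "Asian (South)".toList
def pvK4 : List Char := "Caucasian_European".toList
def pvV4 : List Char := "Caucasian (European)".toList

-- Source B's single while-pass; the inner for over the four _REPL pairs is unrolled
def pvScan (l : List Char) : List Char :=
  if h1 : pvK1.isPrefixOf l then pvV1 ++ pvScan (l.drop pvK1.length)
  else if h2 : pvK2.isPrefixOf l then pvV2 ++ pvScan (l.drop pvK2.length)
  else if h3 : pvK3.isPrefixOf l then pvV3 ++ pvScan (l.drop pvK3.length)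
  else if h4 : pvK4.isPrefixOf l then pvV4 ++ pvScan (l.drop pvK4.length)
  else
    match l with
    | [] => []
    | c :: t => c :: pvScan t
termination_by l.length
decreasing_by
  · have := (List.isPrefixOf_iff_prefix.mp h1).length_le
    simp_all [pvK1]; omega
  · have := (List.isPrefixOf_iff_prefix.mp h2).length_le
    simp_all [pvK2]; omega
  · have := (List.isPrefixOf_iff_prefix.mp h3).length_le
    simp_all [pvK3]; omega
  · have := (List.isPrefixOf_iff_prefix.mp h4).length_le
    simp_all [pvK4]; omega
  · simp

def replace_ethnicity_alt (path : String) : String := String.ofList (pvScan path.toList)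

-- ===== PRECONDITION & SPEC =====
def Spec_replace_ethnicity (path : String) (out : String) : Prop := out = replace_ethnicity_alt path
instance (path : String) (out : String) : Decidable (Spec_replace_ethnicity path out) := by unfold Spec_replace_ethnicity; infer_instance

-- ===== CLAIM (what is proved, stated in full; the proofs are below) =====
def Claim_equal_replace_ethnicity : Prop := ∀ (path : String), Dom_replace_ethnicity path → Spec_replace_ethnicity path (replace_ethnicity path)

-- ===== LEMMAS AND PROOFS =====

-- structural model of Python str.replace (old nonempty) used to reason about PySem.Chars.replace
def pvRep (old new : List Char) : List Char → List Char
  | [] => []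
  | c :: t =>
    if h : old ≠ [] ∧ old.isPrefixOf (c :: t) then new ++ pvRep old new ((c :: t).drop old.length)
    else c :: pvRep old new t
termination_by l => l.length
decreasing_by
  · have hlen : 0 < old.length := List.length_pos_iff.mpr h.1
    simp; omega
  · simp

theorem pvRep_nil (old new : List Char) : pvRep old new [] = [] := by simp [pvRep]

theorem pvRep_head (old new : List Char) (l : List Char) (hne : old ≠ []) (hp : old <+: l) :
    pvRep old new l = new ++ pvRep old new (l.drop old.length) := by
  cases l with
  | nil => simp [List.prefix_nil] at hp; exact absurd hp hne
  | cons c t =>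
    rw [pvRep]
    simp [hne, List.isPrefixOf_iff_prefix.mpr hp]

theorem pvRep_cons (old new : List Char) (c : Char) (t : List Char) (h : ¬ old <+: (c :: t)) :
    pvRep old new (c :: t) = c :: pvRep old new t := by
  have hnp : ¬ (old ≠ [] ∧ old.isPrefixOf (c :: t) = true) := by
    rintro ⟨-, hp⟩; exact h (List.isPrefixOf_iff_prefix.mp hp)
  rw [pvRep, dif_neg hnp]

theorem pvPrefix_append_cases {u p x : List Char} (h : u <+: p ++ x) : u <+: p ∨ p <+: u :=
  List.prefix_or_prefix_of_prefix h ⟨x, rfl⟩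

theorem pvRep_append (old new : List Char) (p : List Char) (hne : old ≠ [])
    (H : ∀ i, i < p.length → ¬ old <+: p.drop i ∧ ¬ p.drop i <+: old) :
    ∀ x, pvRep old new (p ++ x) = p ++ pvRep old new x := by
  induction p with
  | nil => intro x; simp
  | cons c p' ih =>
    intro x
    have hnp : ¬ old <+: (c :: p') ++ x := by
      intro hpre
      rcases pvPrefix_append_cases hpre with h' | h'
      · exact (H 0 (by simp)).1 (by simpa using h')
      · exact (H 0 (by simp)).2 (by simpa using h')
    rw [List.cons_append, pvRep_cons old new c (p' ++ x) hnp,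
      ih (fun i hi => H (i + 1) (by simpa using Nat.succ_lt_succ hi)) x]
    simp

theorem pvRep_prefix_inv (old new : List Char) (hne : old ≠ []) :
    ∀ n l w, l.length ≤ n → w ≠ [] →
      (∀ j, j < w.length → ¬ new <+: w.drop j ∧ ¬ w.drop j <+: new) →
      w <+: pvRep old new l → w <+: l := by
  intro n
  induction n with
  | zero =>
    intro l w hl hw _ hp
    interval_cases hlen : l.length
    · have : l = [] := List.length_eq_zero_iff.mp hlen
      subst this
      rw [pvRep_nil] at hp
      exact absurd (List.prefix_nil.mp hp) hw
  | succ n ih =>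
    intro l w hl hw H hp
    cases l with
    | nil =>
      rw [pvRep_nil] at hp
      exact absurd (List.prefix_nil.mp hp) hw
    | cons c t =>
      by_cases hm : old <+: (c :: t)
      · rw [pvRep_head old new _ hne hm] at hp
        rcases pvPrefix_append_cases hp with h' | h'
        · exact absurd (by simpa using h') (H 0 (by simpa using List.length_pos_iff.mpr hw)).2
        · exact absurd (by simpa using h') (H 0 (by simpa using List.length_pos_iff.mpr hw)).1
      · rw [pvRep_cons old new c t hm] at hp
        cases w with
        | nil => exact absurd rfl hw
        | cons w0 w' =>
          rw [List.cons_prefix_cons] at hp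
          obtain ⟨rfl, hp'⟩ := hp
          rcases eq_or_ne w' [] with rfl | hw'
          · simpa using List.nil_prefix
          · have : w' <+: t := by
              refine ih t w' (by simpa using hl) hw' ?_ hp'
              intro j hj
              simpa using H (j + 1) (by simpa using Nat.succ_lt_succ hj)
            exact List.cons_prefix_cons.mpr ⟨rfl, this⟩

theorem pvRep_id (old new : List Char) (hne : old ≠ []) :
    ∀ l, ¬ old <:+: l → pvRep old new l = l := by
  intro l
  induction l with
  | nil => intro _; exact pvRep_nil old new
  | cons c t ih =>
    intro hinf
    have hnp : ¬ old <+: (c :: t) := fun h => hinf h.isInfix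
    rw [pvRep_cons old new c t hnp, ih (fun h => hinf (List.infix_cons h))]

theorem pvGo_spec (old new : List Char) (hne : old ≠ []) :
    ∀ fuel l acc, l.length ≤ fuel →
      PySem.Chars.replace.go old new fuel l acc = acc.reverse ++ pvRep old new l := by
  intro fuel
  induction fuel with
  | zero =>
    intro l acc hl
    have : l = [] := List.length_eq_zero_iff.mp (Nat.le_zero.mp hl)
    subst this
    simp [PySem.Chars.replace.go, pvRep_nil]
  | succ n ih =>
    intro l acc hl
    cases l with
    | nil => simp [PySem.Chars.replace.go, pvRep_nil]
    | cons c t =>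
      rw [PySem.Chars.replace.go]
      by_cases hm : old.isPrefixOf (c :: t)
      · have hpre : old <+: (c :: t) := List.isPrefixOf_iff_prefix.mp hm
        have hlen : 0 < old.length := List.length_pos_iff.mpr hne
        rw [if_pos hm, ih _ _ (by simp at hl ⊢; omega),
          pvRep_head old new _ hne hpre]
        simp
      · rw [if_neg hm, ih _ _ (by simpa using Nat.lt_succ_iff.mp (by simpa using hl)),
          pvRep_cons old new c t (fun h => hm (List.isPrefixOf_iff_prefix.mpr h))]
        simp

theorem pvReplace_eq_pvRep (s old new : List Char) (hne : old ≠ []) :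
    PySem.Chars.replace s old new = pvRep old new s := by
  rw [PySem.Chars.replace, if_neg (by simpa using hne)]
  simpa using pvGo_spec old new hne s.length s [] le_rfl

theorem pvStep_eq (p k v : String) (hk : k.toList ≠ []) :
    (if PySem.Str.isIn k p then PySem.Str.replace p k v else p) = PySem.Str.replace p k v := by
  by_cases h : PySem.Str.isIn k p
  · rw [if_pos h]
  · rw [if_neg h]
    have hninf : ¬ k.toList <:+: p.toList := fun hin =>
      h ((PySem.Str.isIn_iff_infix k p).mpr hin)
    refine String.toList_inj.mp ?_
    rw [PySem.Str.toList_replace, pvReplace_eq_pvRep _ _ _ hk,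
      pvRep_id _ _ hk _ hninf]

theorem pvChain_eq : ∀ n (l : List Char), l.length ≤ n →
    pvRep pvK4 pvV4 (pvRep pvK3 pvV3 (pvRep pvK2 pvV2 (pvRep pvK1 pvV1 l))) = pvScan l := by
  intro n
  induction n with
  | zero =>
    intro l hl
    have : l = [] := List.length_eq_zero_iff.mp (Nat.le_zero.mp hl)
    subst this
    rw [pvScan, dif_neg (by decide), dif_neg (by decide), dif_neg (by decide), dif_neg (by decide)]
    simp [pvRep_nil]
  | succ n ih =>
    intro l hl
    by_cases h1 : pvK1 <+: l
    · obtain ⟨t, rfl⟩ := h1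
      rw [pvRep_head pvK1 pvV1 _ (by decide) ⟨t, rfl⟩, List.drop_left,
        pvRep_append pvK2 pvV2 pvV1 (by decide) (by decide),
        pvRep_append pvK3 pvV3 pvV1 (by decide) (by decide),
        pvRep_append pvK4 pvV4 pvV1 (by decide) (by decide),
        pvScan, dif_pos (List.isPrefixOf_iff_prefix.mpr ⟨t, rfl⟩), List.drop_left,
        ih t (by have h18 : pvK1.length = 18 := by decide
                 simp [h18] at hl ⊢; omega)]
    · by_cases h2 : pvK2 <+: l
      · obtain ⟨t, rfl⟩ := h2
        rw [pvRep_append pvK1 pvV1 pvK2 (by decide) (by decide),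
          pvRep_head pvK2 pvV2 _ (by decide) ⟨pvRep pvK1 pvV1 t, rfl⟩, List.drop_left,
          pvRep_append pvK3 pvV3 pvV2 (by decide) (by decide),
          pvRep_append pvK4 pvV4 pvV2 (by decide) (by decide),
          pvScan, dif_neg (fun hb => h1 (List.isPrefixOf_iff_prefix.mp hb)),
          dif_pos (List.isPrefixOf_iff_prefix.mpr ⟨t, rfl⟩), List.drop_left,
          ih t (by have h10 : pvK2.length = 10 := by decide
                   simp [h10] at hl ⊢; omega)]
      · by_cases h3 : pvK3 <+: l
        · obtain ⟨t, rfl⟩ := h3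
          rw [pvRep_append pvK1 pvV1 pvK3 (by decide) (by decide),
            pvRep_append pvK2 pvV2 pvK3 (by decide) (by decide),
            pvRep_head pvK3 pvV3 _ (by decide) ⟨pvRep pvK2 pvV2 (pvRep pvK1 pvV1 t), rfl⟩,
            List.drop_left,
            pvRep_append pvK4 pvV4 pvV3 (by decide) (by decide),
            pvScan, dif_neg (fun hb => h1 (List.isPrefixOf_iff_prefix.mp hb)),
            dif_neg (fun hb => h2 (List.isPrefixOf_iff_prefix.mp hb)),
            dif_pos (List.isPrefixOf_iff_prefix.mpr ⟨t, rfl⟩), List.drop_left,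
            ih t (by have h11 : pvK3.length = 11 := by decide
                     simp [h11] at hl ⊢; omega)]
        · by_cases h4 : pvK4 <+: l
          · obtain ⟨t, rfl⟩ := h4
            rw [pvRep_append pvK1 pvV1 pvK4 (by decide) (by decide),
              pvRep_append pvK2 pvV2 pvK4 (by decide) (by decide),
              pvRep_append pvK3 pvV3 pvK4 (by decide) (by decide),
              pvRep_head pvK4 pvV4 _ (by decide)
                ⟨pvRep pvK3 pvV3 (pvRep pvK2 pvV2 (pvRep pvK1 pvV1 t)), rfl⟩,
              List.drop_left,
              pvScan, dif_neg (fun hb => h1 (List.isPrefixOf_iff_prefix.mp hb)),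
              dif_neg (fun hb => h2 (List.isPrefixOf_iff_prefix.mp hb)),
              dif_neg (fun hb => h3 (List.isPrefixOf_iff_prefix.mp hb)),
              dif_pos (List.isPrefixOf_iff_prefix.mpr ⟨t, rfl⟩), List.drop_left,
              ih t (by have h18 : pvK4.length = 18 := by decide
                       simp [h18] at hl ⊢; omega)]
          · cases l with
            | nil =>
              rw [pvScan, dif_neg (by decide), dif_neg (by decide), dif_neg (by decide),
                dif_neg (by decide)]
              simp [pvRep_nil]
            | cons c t =>
              have e1 : pvRep pvK1 pvV1 (c :: t) = c :: pvRep pvK1 pvV1 t :=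
                pvRep_cons _ _ _ _ h1
              have n2 : ¬ pvK2 <+: pvRep pvK1 pvV1 (c :: t) := fun h =>
                h2 (pvRep_prefix_inv pvK1 pvV1 (by decide) (c :: t).length (c :: t) pvK2
                  le_rfl (by decide) (by decide) h)
              have e2 : pvRep pvK2 pvV2 (pvRep pvK1 pvV1 (c :: t))
                  = c :: pvRep pvK2 pvV2 (pvRep pvK1 pvV1 t) := by
                rw [e1] at n2 ⊢
                exact pvRep_cons _ _ _ _ n2
              have n3 : ¬ pvK3 <+: pvRep pvK2 pvV2 (pvRep pvK1 pvV1 (c :: t)) := fun h =>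
                h3 (pvRep_prefix_inv pvK1 pvV1 (by decide) (c :: t).length (c :: t) pvK3
                  le_rfl (by decide) (by decide)
                  (pvRep_prefix_inv pvK2 pvV2 (by decide) (pvRep pvK1 pvV1 (c :: t)).length
                    (pvRep pvK1 pvV1 (c :: t)) pvK3 le_rfl (by decide) (by decide) h))
              have e3 : pvRep pvK3 pvV3 (pvRep pvK2 pvV2 (pvRep pvK1 pvV1 (c :: t)))
                  = c :: pvRep pvK3 pvV3 (pvRep pvK2 pvV2 (pvRep pvK1 pvV1 t)) := by
                rw [e2] at n3 ⊢
                exact pvRep_cons _ _ _ _ n3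
              have n4 : ¬ pvK4 <+: pvRep pvK3 pvV3 (pvRep pvK2 pvV2 (pvRep pvK1 pvV1 (c :: t))) :=
                fun h =>
                h4 (pvRep_prefix_inv pvK1 pvV1 (by decide) (c :: t).length (c :: t) pvK4
                  le_rfl (by decide) (by decide)
                  (pvRep_prefix_inv pvK2 pvV2 (by decide) (pvRep pvK1 pvV1 (c :: t)).length
                    (pvRep pvK1 pvV1 (c :: t)) pvK4 le_rfl (by decide) (by decide)
                    (pvRep_prefix_inv pvK3 pvV3 (by decide)
                      (pvRep pvK2 pvV2 (pvRep pvK1 pvV1 (c :: t))).length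
                      (pvRep pvK2 pvV2 (pvRep pvK1 pvV1 (c :: t))) pvK4 le_rfl
                      (by decide) (by decide) h)))
              have e4 : pvRep pvK4 pvV4 (pvRep pvK3 pvV3 (pvRep pvK2 pvV2 (pvRep pvK1 pvV1 (c :: t))))
                  = c :: pvRep pvK4 pvV4 (pvRep pvK3 pvV3 (pvRep pvK2 pvV2 (pvRep pvK1 pvV1 t))) := by
                rw [e3] at n4 ⊢
                exact pvRep_cons _ _ _ _ n4
              rw [e4, pvScan, dif_neg (fun hb => h1 (List.isPrefixOf_iff_prefix.mp hb)),
                dif_neg (fun hb => h2 (List.isPrefixOf_iff_prefix.mp hb)),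
                dif_neg (fun hb => h3 (List.isPrefixOf_iff_prefix.mp hb)),
                dif_neg (fun hb => h4 (List.isPrefixOf_iff_prefix.mp hb)),
                ih t (by simpa using Nat.lt_succ_iff.mp (by simpa using hl))]

-- ===== VERDICT (by name: the statement is the Claim_ definition above) =====
theorem replace_ethnicity_spec : Claim_equal_replace_ethnicity := by
  intro path _
  unfold Spec_replace_ethnicity replace_ethnicity replace_ethnicity_alt
  simp only [List.foldl]
  rw [pvStep_eq _ _ _ (by decide), pvStep_eq _ _ _ (by decide),
    pvStep_eq _ _ _ (by decide), pvStep_eq _ _ _ (by decide)]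
  refine String.toList_inj.mp ?_
  rw [String.toList_ofList, PySem.Str.toList_replace, PySem.Str.toList_replace,
    PySem.Str.toList_replace, PySem.Str.toList_replace,
    pvReplace_eq_pvRep _ _ _ (by decide), pvReplace_eq_pvRep _ _ _ (by decide),
    pvReplace_eq_pvRep _ _ _ (by decide), pvReplace_eq_pvRep _ _ _ (by decide)]
  exact pvChain_eq path.toList.length path.toList le_rfl
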